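-- pv_equiv track=rewrite | github.com/christianreiser/reinforcement-learning-course-uni-stuttgart | ex02-mdps/test.py | generate_list_of_all_policies
-- ===== SOURCE A (Python) =====
-- def generate_list_of_all_policies(start,end,base,step=1):
--
--     def Convert(n,base):
--        string = "0123456789"
--        if n < base:
--           return string[n]
--        else:
--           return Convert(n//base,base) + string[n%base]
--     return (Convert(i,base) for i in range(start,end,step))
-- ===== SOURCE B (Python) =====
-- def generate_list_of_all_policies(start, end, base, step=1):
--     string = "0123456789"
--     out = []
--     for n in range(start, end, step):
--         if n < base:
--             out.append(string[n])
--         else: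
--             digits = []
--             while n >= base:
--                 digits.append(string[n % base])
--                 n //= base
--             out.append(string[n] + "".join(reversed(digits)))
--     return out
-- ===== Notes on version B (the rewrite author's own statement) =====
-- stated objective: alternative
-- what changed: Replaces the recursive Convert helper and the lazy generator with an iterative digit loop (repeated divmod collecting digits least-significant first, then a reverse-join) inside a single eager loop over the range; Pre_ excludes step=0 and raising/diverging conversions, and conservatively excludes multi-digit conversions with base outside 2..10 (accidental values via negative indexing, which B reproduces anyway) and endpoint-bound corner cases.
-- outside the precondition, e.g. on generate_list_of_all_policies(5, 6, -2, 1): A returns ['79'], B returns ['79']; on generate_list_of_all_policies(13, 14, 11, 1): A returns ['12'], B returns ['12']; on generate_list_of_all_policies(-10, -12, 10, -3): A returns ['0'], B returns ['0']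
import Mathlib
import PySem

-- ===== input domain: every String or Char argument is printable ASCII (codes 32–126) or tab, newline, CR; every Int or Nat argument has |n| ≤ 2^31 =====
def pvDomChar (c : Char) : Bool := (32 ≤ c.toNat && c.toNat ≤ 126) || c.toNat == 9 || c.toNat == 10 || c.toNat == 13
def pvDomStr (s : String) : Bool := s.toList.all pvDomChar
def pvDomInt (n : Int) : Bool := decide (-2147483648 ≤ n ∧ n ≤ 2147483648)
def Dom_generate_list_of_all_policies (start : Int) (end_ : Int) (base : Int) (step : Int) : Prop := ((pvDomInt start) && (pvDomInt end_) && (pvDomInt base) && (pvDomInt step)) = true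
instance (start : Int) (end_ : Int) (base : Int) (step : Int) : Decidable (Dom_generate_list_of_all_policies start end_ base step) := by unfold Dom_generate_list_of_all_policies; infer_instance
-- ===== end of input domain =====

-- B replaces the recursive Convert helper and the lazy generator with an iterative
-- digit-collecting loop inside one eager loop over the range (objective: alternative).
-- A returns a generator; the equivalence is about the materialized sequence of strings.

-- ===== PORT A =====
-- string[n] on "0123456789": Python yields a 1-char string; raising indices are excluded by Pre_.
def pvDig (n : Int) : List Char := ((PySem.List.pyGet? "0123456789".toList n).map (fun c => [c])).getD []

-- Convert(n, base); fuel n.natAbs+1 only makes the recursion total: inside Pre_ it never runs out.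
def pvConvertA : Nat → Int → Int → List Char
  | 0, _, _ => []
  | f + 1, n, base =>
    if n < base then pvDig n
    else pvConvertA f (PySem.Int.floordiv n base) base ++ pvDig (PySem.Int.mod n base)

def generate_list_of_all_policies (start : Int) (end_ : Int) (base : Int) (step : Int) : List String :=
  (PySem.List.pyRange start end_ step).map (fun i => String.ofList (pvConvertA (i.natAbs + 1) i base))

-- ===== PORT B =====
-- while n >= base: digits.append(string[n % base]); n //= base   (fuel only for totality)
def pvLoopB : Nat → Int → Int → List (List Char) → Int × List (List Char)
  | 0, n, _, ds => (n, ds)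
  | f + 1, n, base, ds =>
    if base ≤ n then pvLoopB f (PySem.Int.floordiv n base) base (ds ++ [pvDig (PySem.Int.mod n base)])
    else (n, ds)

-- string[n] + "".join(reversed(digits))
def pvConvertB (n : Int) (base : Int) : List Char :=
  if n < base then pvDig n
  else
    let r := pvLoopB (n.natAbs + 1) n base []
    pvDig r.1 ++ r.2.reverse.flatten

def generate_list_of_all_policies_alt (start : Int) (end_ : Int) (base : Int) (step : Int) : List String :=
  (PySem.List.pyRange start end_ step).map (fun i => String.ofList (pvConvertB i base))

-- ===== PRECONDITION & SPEC =====
-- Pre_ excludes step = 0 (range raises ValueError) and the inputs on which Convert raises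
-- (IndexError from indices outside [-10, 9], ZeroDivisionError for base 0, RecursionError for
-- base 1 / negative bases) or never terminates; for simplicity it also excludes multi-digit
-- conversions with base outside 2..10, where A returns accidental strings via negative
-- indexing / lucky digits (values B reproduces anyway, see cites), and it bounds the range
-- elements by the range ENDPOINTS (start and end_-1, resp. end_+1 and start), which for
-- |step| > 1 is marginally more conservative than the elements actually hit (see cites).
def Pre_generate_list_of_all_policies (start : Int) (end_ : Int) (base : Int) (step : Int) : Prop :=
  step ≠ 0 ∧
  ((if 0 < step then end_ ≤ start else start ≤ end_) ∨
   (-10 ≤ (if 0 < step then start else end_ + 1) ∧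
     (2 ≤ base ∧ base ≤ 10 ∨
      ((if 0 < step then end_ - 1 else start) ≤ 9 ∧ (if 0 < step then end_ - 1 else start) < base))))
instance (start : Int) (end_ : Int) (base : Int) (step : Int) : Decidable (Pre_generate_list_of_all_policies start end_ base step) := by unfold Pre_generate_list_of_all_policies; infer_instance

def pvWitness_generate_list_of_all_policies : Int × Int × Int × Int := (0, 8, 2, 1)

def Spec_generate_list_of_all_policies (start : Int) (end_ : Int) (base : Int) (step : Int) (out : List String) : Prop := out = generate_list_of_all_policies_alt start end_ base step
instance (start : Int) (end_ : Int) (base : Int) (step : Int) (out : List String) : Decidable (Spec_generate_list_of_all_policies start end_ base step out) := by unfold Spec_generate_list_of_all_policies; infer_instance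

-- ===== CLAIM (what is proved, stated in full; the proofs are below) =====
def Claim_equal_generate_list_of_all_policies : Prop := ∀ (start : Int) (end_ : Int) (base : Int) (step : Int), Dom_generate_list_of_all_policies start end_ base step → Pre_generate_list_of_all_policies start end_ base step → Spec_generate_list_of_all_policies start end_ base step (generate_list_of_all_policies start end_ base step)

-- ===== LEMMAS AND PROOFS =====

lemma pvDiv_bounds (n b : Int) (hb : 2 ≤ b) (hn : b ≤ n) :
    0 ≤ PySem.Int.floordiv n b ∧ PySem.Int.floordiv n b < n := by
  rw [PySem.Int.floordiv_eq_ediv_of_pos (by omega)]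
  constructor
  · exact Int.ediv_nonneg (by omega) (by omega)
  · rw [← PySem.Int.floordiv_eq_ediv_of_pos (by omega : (0:Int) < b)]
    exact (PySem.Int.floordiv_lt_iff_lt_mul (by omega : (0:Int) < b)).mpr (by nlinarith)

lemma pvLoopB_acc (f : Nat) : ∀ (n b : Int) (a ds : List (List Char)),
    pvLoopB f n b (a ++ ds) = ((pvLoopB f n b ds).1, a ++ (pvLoopB f n b ds).2) := by
  induction f with
  | zero => intro n b a ds; simp [pvLoopB]
  | succ f ih =>
    intro n b a ds
    simp only [pvLoopB]
    split
    · rw [List.append_assoc, ih]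
    · simp

lemma pvLoopB_fuel (f : Nat) : ∀ (g : Nat) (n b : Int) (ds : List (List Char)),
    2 ≤ b → n.natAbs < f → n.natAbs < g → pvLoopB f n b ds = pvLoopB g n b ds := by
  induction f with
  | zero => intro g n b ds _ hf _; omega
  | succ f ih =>
    intro g n b ds hb hf hg
    match g with
    | 0 => omega
    | g + 1 =>
      simp only [pvLoopB]
      split
      · rename_i h
        obtain ⟨h0, hlt⟩ := pvDiv_bounds n b hb h
        exact ih g _ b _ hb (by omega) (by omega)
      · rfl

lemma pvConvertB_step (n b : Int) (hb : 2 ≤ b) (hn : b ≤ n) :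
    pvConvertB n b = pvConvertB (PySem.Int.floordiv n b) b ++ pvDig (PySem.Int.mod n b) := by
  obtain ⟨h0, hlt⟩ := pvDiv_bounds n b hb hn
  set m := PySem.Int.floordiv n b with hm
  have hnn : ¬ n < b := by omega
  have hstep : pvLoopB (n.natAbs + 1) n b [] =
      ((pvLoopB (m.natAbs + 1) m b []).1, pvDig (PySem.Int.mod n b) :: (pvLoopB (m.natAbs + 1) m b []).2) := by
    have h1 : pvLoopB (n.natAbs + 1) n b [] = pvLoopB n.natAbs m b [pvDig (PySem.Int.mod n b)] := by
      simp only [pvLoopB, if_pos hn, List.nil_append, hm]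
    have h2 : pvLoopB n.natAbs m b ([pvDig (PySem.Int.mod n b)] ++ []) =
        ((pvLoopB n.natAbs m b []).1, [pvDig (PySem.Int.mod n b)] ++ (pvLoopB n.natAbs m b []).2) :=
      pvLoopB_acc n.natAbs m b [pvDig (PySem.Int.mod n b)] []
    have h3 : pvLoopB n.natAbs m b [] = pvLoopB (m.natAbs + 1) m b [] :=
      pvLoopB_fuel n.natAbs (m.natAbs + 1) m b [] hb (by omega) (by omega)
    rw [h1, ← h3]
    simpa using h2
  by_cases hmb : m < b
  · have hstop : pvLoopB (m.natAbs + 1) m b [] = (m, []) := by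
      simp only [pvLoopB]; rw [if_neg (by omega)]
    simp [pvConvertB, hnn, hmb, hstep, hstop]
  · simp only [pvConvertB, hnn, if_neg hmb]
    rw [hstep]
    simp [List.flatten_append, List.append_assoc]

lemma pvConvert_eq (k : Nat) : ∀ (n b : Int) (f : Nat), n.natAbs = k → 2 ≤ b → n.natAbs < f →
    pvConvertA f n b = pvConvertB n b := by
  induction k using Nat.strong_induction_on with
  | _ k ih =>
    intro n b f hk hb hf
    match f with
    | 0 => omega
    | f + 1 =>
      by_cases hnb : n < b
      · simp [pvConvertA, pvConvertB, hnb]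
      · have hn : b ≤ n := by omega
        obtain ⟨h0, hlt⟩ := pvDiv_bounds n b hb hn
        have hrec : pvConvertA f (PySem.Int.floordiv n b) b = pvConvertB (PySem.Int.floordiv n b) b :=
          ih (PySem.Int.floordiv n b).natAbs (by omega) _ b f rfl hb (by omega)
        simp only [pvConvertA, if_neg hnb, hrec]
        exact (pvConvertB_step n b hb hn).symm

-- ===== VERDICT (by name: the statement is the Claim_ definition above) =====
theorem generate_list_of_all_policies_spec : Claim_equal_generate_list_of_all_policies := by
  intro start end_ base step _hDom hPre
  unfold Spec_generate_list_of_all_policies generate_list_of_all_policies generate_list_of_all_policies_alt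
  refine List.map_congr_left ?_
  intro i hi
  obtain ⟨hstep, hPre2⟩ := hPre
  have hbounds : (if 0 < step then start else end_ + 1) ≤ i ∧ i ≤ (if 0 < step then end_ - 1 else start) ∧
      ¬ (if 0 < step then end_ ≤ start else start ≤ end_) := by
    by_cases hs : 0 < step
    · obtain ⟨h1, h2, -⟩ := (PySem.List.mem_pyRange_iff_of_pos hs i).mp hi
      simp only [if_pos hs]; omega
    · have hs' : step < 0 := by omega
      obtain ⟨h1, h2, -⟩ := (PySem.List.mem_pyRange_iff_of_neg hs' i).mp hi
      simp only [if_neg hs]; omega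
  rcases hPre2 with hempty | ⟨-, hrest⟩
  · exact absurd hempty hbounds.2.2
  rcases hrest with ⟨hb2, -⟩ | ⟨-, hib⟩
  · exact congrArg String.ofList (pvConvert_eq i.natAbs i base (i.natAbs + 1) rfl hb2 (by omega))
  · have : i < base := by omega
    simp [pvConvertA, pvConvertB, this]
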